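-- pv_equiv track=rewrite | github.com/AdithyaWijewickrama/OmiGame | backend/CardPack.py | decs
-- ===== SOURCE A (Python) =====
-- cards = ['7', '8', '9', '10', 'jack', 'queen', 'king', 'ace']
--
-- def decs(s):
--     """
--     decsending order of cards
--     :param s:
--     :return:
--     """
--     d = cards[::-1]
--     r = []
--     i = 0
--     for v in d:
--         if v in s:
--             r.append(v)
--             i += 1
--     return r
-- ===== SOURCE B (Python) =====
-- cards = ['7', '8', '9', '10', 'jack', 'queen', 'king', 'ace']
--
-- def decs(s):
--     present = set(s) & set(cards)
--     return sorted(present, key=cards.index, reverse=True)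
-- ===== Notes on version B (the rewrite author's own statement) =====
-- stated objective: idiomatic
-- what changed: Instead of scanning the reversed master list and appending members of s, B intersects set(s) with set(cards) and sorts that input-derived set by master-list rank in reverse.
import Mathlib
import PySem

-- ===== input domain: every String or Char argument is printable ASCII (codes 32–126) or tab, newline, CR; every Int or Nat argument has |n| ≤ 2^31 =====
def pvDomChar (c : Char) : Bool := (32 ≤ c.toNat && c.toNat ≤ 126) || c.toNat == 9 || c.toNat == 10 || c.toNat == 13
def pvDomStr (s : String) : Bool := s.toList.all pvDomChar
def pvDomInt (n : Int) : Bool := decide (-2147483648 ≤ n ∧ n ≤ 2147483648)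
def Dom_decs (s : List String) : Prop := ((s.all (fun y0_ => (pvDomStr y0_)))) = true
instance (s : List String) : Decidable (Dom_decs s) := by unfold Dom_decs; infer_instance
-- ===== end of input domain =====

-- ===== PORT A =====
-- B changes the strategy: A scans the reversed fixed master list; B sorts set(s) & set(cards) by rank (idiomatic; not faster).
def cardsL : List String := ["7", "8", "9", "10", "jack", "queen", "king", "ace"]

-- d = cards[::-1]; r = []; i = 0; for v in d: if v in s: r.append(v); i += 1; return r
def decs (s : List String) : List String :=
  let d : List String := (PySem.List.slice? cardsL none none (-1)).getD []  -- step -1 never yields none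
  (d.foldl (fun (st : List String × Int) v =>
      if v ∈ s then (st.1 ++ [v], st.2 + 1) else st) ([], 0)).1

-- ===== PORT B =====
-- present = set(s) & set(cards); return sorted(present, key=cards.index, reverse=True)
-- cards.index is exact as (index? cardsL v).getD 0: every element of present is in cardsL, so index? is some.
def decs_alt (s : List String) : List String :=
  let present : PySem.Set String := PySem.Set.inter (PySem.Set.ofList s) (PySem.Set.ofList cardsL)
  PySem.List.sorted present (fun v => (PySem.List.index? cardsL v).getD 0) true

-- ===== PRECONDITION & SPEC =====
def Spec_decs (s : List String) (out : List String) : Prop := out = decs_alt s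
instance (s : List String) (out : List String) : Decidable (Spec_decs s out) := by unfold Spec_decs; infer_instance

-- ===== CLAIM (what is proved, stated in full; the proofs are below) =====
def Claim_equal_decs : Prop := ∀ (s : List String), Dom_decs s → Spec_decs s (decs s)

-- ===== LEMMAS AND PROOFS =====

-- A's loop, reduced: it returns the reversed master list filtered by membership in s.
theorem decs_eq_filter (s : List String) :
    decs s = cardsL.reverse.filter (fun v => decide (v ∈ s)) := by
  unfold decs
  rw [PySem.List.slice?_none_none_neg_one]
  simp only [Option.getD_some]
  have hfun : (fun (st : List String × Int) v =>
      if v ∈ s then (st.1 ++ [v], st.2 + 1) else st)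
      = (fun (st : List String × Int) v =>
        ((if v ∈ s then st.1 ++ [v] else st.1), (if v ∈ s then st.2 + 1 else st.2))) := by
    funext st v; by_cases h : v ∈ s <;> simp [h]
  rw [hfun,
    PySem.List.foldl_prod_mk
      (f := fun (acc : List String) v => if v ∈ s then acc ++ [v] else acc)
      (g := fun (acc : Int) v => if v ∈ s then acc + 1 else acc)]
  show cardsL.reverse.foldl (fun acc v => if v ∈ s then acc ++ [v] else acc) [] = _
  rw [PySem.List.foldl_append_ite_eq_filter, List.nil_append]

theorem decs_alt_eq_filter (s : List String) :
    decs_alt s = cardsL.reverse.filter (fun v => decide (v ∈ s)) := by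
  unfold decs_alt
  apply PySem.List.sorted_rev_eq_of_perm_of_pairwise_gt
  · -- permutation: both are nodup with the same membership
    rw [List.perm_ext_iff_of_nodup]
    · intro x
      simp [List.mem_filter, PySem.Set.mem_inter, PySem.Set.mem_ofList, And.comm]
    · exact List.Nodup.filter _ (by decide : cardsL.reverse.Nodup)
    · exact PySem.Set.nodup_inter _ _ (PySem.Set.nodup_ofList s)
  · -- strictly decreasing rank along the filtered reversed master list
    exact List.Pairwise.sublist List.filter_sublist (by decide)

-- ===== VERDICT (by name: the statement is the Claim_ definition above) =====
theorem decs_spec : Claim_equal_decs := by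
  intro s _
  unfold Spec_decs
  rw [decs_eq_filter, decs_alt_eq_filter]
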